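-- pv_equiv track=rewrite | github.com/josecatela/sgcodewars | day15/day15.py | diana_henninger_day15
-- ===== SOURCE A (Python) =====
-- def diana_henninger_day15(arr):
--     pos = []
--     peaks = []
--     result = {'pos': pos, 'peaks': peaks}
--     len_arr = len(arr)
--     if(len_arr==0): return result # empty arr
--     prev = arr[0]
--     peaky = False
--     for i in range(len_arr):
--         a = arr[i]
--         if not peaky:
--             if prev < a: # might be a peak?
--                 peaky = True
--                 temp_peak = a
--                 temp_pos = i
--         else: # might have a peak
--             if prev > a: # yay, it's a peak!
--                 pos.append(temp_pos)
--                 peaks.append(temp_peak)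
--                 peaky = False
--             elif prev < a: # hmm not yet...
--                 temp_peak = a
--                 temp_pos = i
--         prev = a
--     return result
-- ===== SOURCE B (Python) =====
-- def diana_henninger_day15(arr):
--     # Phase 1: compress into maximal runs of equal values, keeping first index.
--     runs = []
--     prev = None
--     i = 0
--     for v in arr:
--         if prev is None or v != prev:
--             runs.append((v, i))
--         prev = v
--         i += 1
--     # Phase 2: an interior run is a peak iff strictly above both neighbour runs.
--     pos = []
--     peaks = []
--     for (pv, _), (cv, ci), (nv, _) in zip(runs, runs[1:], runs[2:]):
--         if cv > pv and cv > nv: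
--             pos.append(ci)
--             peaks.append(cv)
--     return {'pos': pos, 'peaks': peaks}
-- ===== Notes on version B (the rewrite author's own statement) =====
-- stated objective: alternative
-- what changed: A's single-pass boolean state machine (peaky/temp_peak/temp_pos) is replaced by a two-phase decomposition: compress the array into (value, first-index) runs, then scan 3-run windows and report interior runs strictly above both neighbours.
import Mathlib
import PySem

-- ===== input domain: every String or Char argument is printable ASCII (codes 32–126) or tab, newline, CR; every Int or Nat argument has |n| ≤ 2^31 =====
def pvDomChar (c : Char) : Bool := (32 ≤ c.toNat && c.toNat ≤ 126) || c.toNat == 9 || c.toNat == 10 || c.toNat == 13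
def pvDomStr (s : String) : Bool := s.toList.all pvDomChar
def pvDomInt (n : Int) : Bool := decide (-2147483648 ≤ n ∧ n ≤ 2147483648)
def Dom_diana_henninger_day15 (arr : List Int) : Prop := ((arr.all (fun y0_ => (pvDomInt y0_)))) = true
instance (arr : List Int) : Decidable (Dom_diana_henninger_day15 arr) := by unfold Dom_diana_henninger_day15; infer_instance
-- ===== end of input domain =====

-- B replaces A's one-pass peak state machine by a run-compression pass followed by a
-- 3-window scan over the runs (different decomposition, same O(n) cost).

-- ===== PORT A =====
-- 'for i in range(len_arr): a = arr[i]' iterates the (index, value) pairs of arr: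
def pvEnum (i : Int) : List Int → List (Int × Int)
  | [] => []
  | a :: rest => (i, a) :: pvEnum (i + 1) rest

-- state: (pos, peaks, prev, peaky, temp_peak, temp_pos)
def pvAStep (st : List Int × List Int × Int × Bool × Int × Int) (ia : Int × Int) :
    List Int × List Int × Int × Bool × Int × Int :=
  let (pos, peaks, prev, peaky, tpk, tpos) := st
  let (i, a) := ia
  if !peaky then
    if prev < a then (pos, peaks, a, true, a, i) else (pos, peaks, a, peaky, tpk, tpos)
  else
    if prev > a then (pos ++ [tpos], peaks ++ [tpk], a, false, tpk, tpos)
    else if prev < a then (pos, peaks, a, true, a, i)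
    else (pos, peaks, a, peaky, tpk, tpos)

def diana_henninger_day15 (arr : List Int) : List (String × List Int) :=
  match arr with
  | [] => [("pos", []), ("peaks", [])]
  | a0 :: _ =>
    -- temp_peak/temp_pos are unassigned before the first ascent; they are only read
    -- after being set, so the 0 initialisers are never observed.
    let st := (pvEnum 0 arr).foldl pvAStep ([], [], a0, false, 0, 0)
    [("pos", st.1), ("peaks", st.2.1)]

-- ===== PORT B =====
-- phase 1 of Source B: runs of equal values, (value, first index), prev starts as None
def pvRunsGo (i : Int) (prev : Option Int) : List Int → List (Int × Int)
  | [] => []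
  | v :: rest =>
    if prev = none ∨ some v ≠ prev then (v, i) :: pvRunsGo (i + 1) (some v) rest
    else pvRunsGo (i + 1) (some v) rest

-- phase 2 of Source B: loop over zip(runs, runs[1:], runs[2:])
def pvBStep (acc : List Int × List Int) (t : (Int × Int) × (Int × Int) × (Int × Int)) :
    List Int × List Int :=
  let ((pv, _), (cv, ci), (nv, _)) := t
  if pv < cv ∧ nv < cv then (acc.1 ++ [ci], acc.2 ++ [cv]) else acc

def diana_henninger_day15_alt (arr : List Int) : List (String × List Int) :=
  let runs := pvRunsGo 0 none arr
  let acc := (runs.zip ((runs.drop 1).zip (runs.drop 2))).foldl pvBStep ([], [])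
  [("pos", acc.1), ("peaks", acc.2)]

-- ===== PRECONDITION & SPEC =====
def Spec_diana_henninger_day15 (arr : List Int) (out : List (String × List Int)) : Prop := out = diana_henninger_day15_alt arr
instance (arr : List Int) (out : List (String × List Int)) : Decidable (Spec_diana_henninger_day15 arr out) := by unfold Spec_diana_henninger_day15; infer_instance

-- ===== CLAIM (what is proved, stated in full; the proofs are below) =====
def Claim_equal_diana_henninger_day15 : Prop := ∀ (arr : List Int), Dom_diana_henninger_day15 arr → Spec_diana_henninger_day15 arr (diana_henninger_day15 arr)

-- ===== LEMMAS AND PROOFS =====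

-- the (pos-entry, peaks-entry) pairs A's loop appends, as an emission recursion
def pvEmit : Int → Bool → Int → Int → List (Int × Int) → List (Int × Int)
  | _, _, _, _, [] => []
  | prev, peaky, tpk, tpos, (i, a) :: rest =>
    if !peaky then
      if prev < a then pvEmit a true a i rest else pvEmit a false tpk tpos rest
    else
      if prev > a then (tpos, tpk) :: pvEmit a false tpk tpos rest
      else if prev < a then pvEmit a true a i rest
      else pvEmit a true tpk tpos rest

-- the (pos-entry, peaks-entry) pairs B's window scan appends
def pvPeaksW : List (Int × Int) → List (Int × Int)
  | p :: c :: n :: rest =>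
    (if p.1 < c.1 ∧ n.1 < c.1 then [(c.2, c.1)] else []) ++ pvPeaksW (c :: n :: rest)
  | _ => []

theorem pvA_foldl (ps : List (Int × Int)) :
    ∀ (pos peaks : List Int) (prev : Int) (pk : Bool) (tpk tpos : Int),
      (ps.foldl pvAStep (pos, peaks, prev, pk, tpk, tpos)).1 =
        pos ++ (pvEmit prev pk tpk tpos ps).map Prod.fst ∧
      (ps.foldl pvAStep (pos, peaks, prev, pk, tpk, tpos)).2.1 =
        peaks ++ (pvEmit prev pk tpk tpos ps).map Prod.snd := by
  induction ps with
  | nil => intro pos peaks prev pk tpk tpos; simp [pvEmit]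
  | cons ia rest ih =>
    intro pos peaks prev pk tpk tpos
    obtain ⟨i, a⟩ := ia
    rw [List.foldl_cons]
    cases pk with
    | false =>
      by_cases h1 : prev < a <;> · simp only [pvAStep, pvEmit]; simp [h1, ih]
    | true =>
      by_cases h1 : prev > a
      · simp only [pvAStep, pvEmit]; simp [h1, ih, List.append_assoc]
      · by_cases h2 : prev < a <;> · simp only [pvAStep, pvEmit]; simp [h1, h2, ih]

theorem pvB_foldl (runs : List (Int × Int)) :
    ∀ (pos peaks : List Int),
      (runs.zip ((runs.drop 1).zip (runs.drop 2))).foldl pvBStep (pos, peaks) =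
        (pos ++ (pvPeaksW runs).map Prod.fst, peaks ++ (pvPeaksW runs).map Prod.snd) := by
  induction runs using pvPeaksW.induct with
  | case1 p c n rest ih =>
    intro pos peaks
    simp only [List.drop_succ_cons, List.drop_zero, List.zip_cons_cons, List.foldl_cons]
    rw [pvPeaksW]
    obtain ⟨pv, pj⟩ := p; obtain ⟨cv, ci⟩ := c; obtain ⟨nv, nj⟩ := n
    simp only [List.drop_succ_cons, List.drop_zero] at ih
    by_cases h : pv < cv ∧ nv < cv <;> simp [pvBStep, h, ih, List.append_assoc]
  | case2 runs h =>
    intro pos peaks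
    cases runs with
    | nil => simp [pvPeaksW]
    | cons p t =>
      cases t with
      | nil => simp [pvPeaksW]
      | cons c t2 =>
        cases t2 with
        | nil => simp [pvPeaksW]
        | cons n r => exact absurd rfl (h p c n r)

theorem pvPeaksW_skip (P C : Int × Int) (rest : List (Int × Int)) (h : ¬ P.1 < C.1) :
    pvPeaksW (P :: C :: rest) = pvPeaksW (C :: rest) := by
  cases rest with
  | nil => simp [pvPeaksW]
  | cons n r => rw [pvPeaksW]; simp [h]

theorem pvMain (l : List Int) :
    ∀ (i : Int),
      (∀ (prev tpk tpos j : Int),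
        pvEmit prev false tpk tpos (pvEnum i l) =
          pvPeaksW ((prev, j) :: pvRunsGo i (some prev) l)) ∧
      (∀ (P : Int × Int) (v ci : Int), P.1 < v →
        pvEmit v true v ci (pvEnum i l) =
          pvPeaksW (P :: (v, ci) :: pvRunsGo i (some v) l)) := by
  induction l with
  | nil =>
    intro i
    constructor
    · intro prev tpk tpos j; simp [pvEnum, pvRunsGo, pvEmit, pvPeaksW]
    · intro P v ci _; simp [pvEnum, pvRunsGo, pvEmit, pvPeaksW]
  | cons a rest ih =>
    intro i
    constructor
    · intro prev tpk tpos j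
      rw [pvEnum, pvEmit, pvRunsGo]
      rcases lt_trichotomy prev a with hlt | heq | hgt
      · -- ascent: enter peaky state
        have hne : some a ≠ some prev := by simp; omega
        simp only [hlt, if_pos (Or.inr hne), if_pos, Bool.not_false, if_true]
        exact (ih (i + 1)).2 (prev, j) a i hlt
      · -- equal: run continues
        subst heq
        simp only [lt_irrefl, if_neg (by simp : ¬ (some prev = none ∨ some prev ≠ some prev))]
        simp only [Bool.not_false, if_true, if_neg (lt_irrefl prev)]
        exact (ih (i + 1)).1 prev tpk tpos j
      · -- descent: new lower run, head run can never be a peak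
        have hne : some a ≠ some prev := by simp; omega
        simp only [if_pos (Or.inr hne), Bool.not_false, if_true, if_neg (by omega : ¬ prev < a)]
        rw [pvPeaksW_skip (prev, j) (a, i) _ (by simpa using by omega : ¬ (prev, j).1 < (a, i).1)]
        exact (ih (i + 1)).1 a tpk tpos i
    · intro P v ci hP
      rw [pvEnum, pvEmit, pvRunsGo]
      rcases lt_trichotomy v a with hlt | heq | hgt
      · -- still rising: candidate moves to the new run
        have hne : some a ≠ some v := by simp; omega
        simp only [if_pos (Or.inr hne), Bool.not_true, if_neg (by simp : ¬ False),
          if_neg (by omega : ¬ v > a), if_pos hlt]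
        rw [pvPeaksW]
        simp only [if_neg (by simp; omega : ¬ (P.1 < v ∧ a < v)), List.nil_append]
        exact (ih (i + 1)).2 (v, ci) a i hlt
      · -- plateau: nothing changes
        subst heq
        simp only [if_neg (by simp : ¬ (some v = none ∨ some v ≠ some v)), Bool.not_true,
          if_neg (by simp : ¬ False), if_neg (lt_irrefl v)]
        exact (ih (i + 1)).2 P v ci hP
      · -- fell: the candidate run is a peak
        have hne : some a ≠ some v := by simp; omega
        simp only [if_pos (Or.inr hne), Bool.not_true, if_neg (by simp : ¬ False),
          if_pos (by omega : v > a)]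
        rw [pvPeaksW]
        simp only [if_pos (by constructor <;> simpa using by omega : P.1 < v ∧ a < v)]
        rw [pvPeaksW_skip (v, ci) (a, i) _ (by simpa using by omega : ¬ (v, ci).1 < (a, i).1)]
        rw [(ih (i + 1)).1 a v ci i]
        simp

-- ===== VERDICT (by name: the statement is the Claim_ definition above) =====
theorem diana_henninger_day15_spec : Claim_equal_diana_henninger_day15 := by
  intro arr _
  unfold Spec_diana_henninger_day15 diana_henninger_day15 diana_henninger_day15_alt
  cases arr with
  | nil => simp [pvRunsGo, pvPeaksW]
  | cons a0 l =>
    simp only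
    rw [pvEnum]
    have h0 : pvEmit a0 false 0 0 ((0, a0) :: pvEnum 1 l) = pvEmit a0 false 0 0 (pvEnum 1 l) := by
      rw [pvEmit]; simp
    have hA := pvA_foldl ((0, a0) :: pvEnum 1 l) [] [] a0 false 0 0
    have hruns : pvRunsGo 0 none (a0 :: l) = (a0, 0) :: pvRunsGo 1 (some a0) l := by
      rw [pvRunsGo]; simp
    have hB := pvB_foldl (pvRunsGo 0 none (a0 :: l)) [] []
    have hM := (pvMain l 1).1 a0 0 0 0
    simp only [hruns] at hB
    obtain ⟨hA1, hA2⟩ := hA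
    rw [List.foldl_cons] at hA1 hA2
    simp only [List.drop_one] at hB ⊢
    rw [hruns]
    rw [hB]
    simp [hA1, hA2, h0, hM]
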